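-- pv_equiv track=rewrite | github.com/noxrahneo/CoBRA-Net | scripts/RtoPython/09_annotate_clusters.py | invert_signatures
-- ===== SOURCE A (Python) =====
-- def normalize_gene_symbol(gene: str) -> str:
--     return str(gene).strip().upper()
--
-- def invert_signatures(
--     signatures: dict[str, list[str]],
-- ) -> dict[str, list[str]]:
--     gene_to_labels: dict[str, set[str]] = {}
--     for label, genes in signatures.items():
--         for gene in genes:
--             norm_gene = normalize_gene_symbol(str(gene))
--             if not norm_gene:
--                 continue
--             gene_to_labels.setdefault(norm_gene, set()).add(str(label))
--     return {
--         gene: sorted(list(labels))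
--         for gene, labels in gene_to_labels.items()
--     }
-- ===== SOURCE B (Python) =====
-- def _insert_sorted_unique(labs: list[str], lab: str) -> list[str]:
--     """Return labs (assumed sorted, duplicate-free) with lab inserted in order;
--     unchanged if lab is already present."""
--     for i, x in enumerate(labs):
--         if lab == x:
--             return labs
--         if lab < x:
--             return labs[:i] + [lab] + labs[i:]
--     return labs + [lab]
--
--
-- def invert_signatures(
--     signatures: dict[str, list[str]],
-- ) -> dict[str, list[str]]:
--     # Keep each gene's label list sorted and duplicate-free as it is built,
--     # so no per-gene set and no final sorting pass are needed.
--     gene_to_labels: dict[str, list[str]] = {}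
--     for label, genes in signatures.items():
--         for gene in genes:
--             g = str(gene).strip().upper()
--             if g:
--                 gene_to_labels[g] = _insert_sorted_unique(
--                     gene_to_labels.get(g, []), str(label)
--                 )
--     return gene_to_labels
-- ===== Notes on version B (the rewrite author's own statement) =====
-- stated objective: alternative
-- what changed: B drops A's per-gene set and the final sorted() pass over every value: it keeps each gene's label list sorted and duplicate-free from the start, inserting each label at its ordered position (hand-written ordered-unique insertion) as the events are scanned once in input order.
import Mathlib
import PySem

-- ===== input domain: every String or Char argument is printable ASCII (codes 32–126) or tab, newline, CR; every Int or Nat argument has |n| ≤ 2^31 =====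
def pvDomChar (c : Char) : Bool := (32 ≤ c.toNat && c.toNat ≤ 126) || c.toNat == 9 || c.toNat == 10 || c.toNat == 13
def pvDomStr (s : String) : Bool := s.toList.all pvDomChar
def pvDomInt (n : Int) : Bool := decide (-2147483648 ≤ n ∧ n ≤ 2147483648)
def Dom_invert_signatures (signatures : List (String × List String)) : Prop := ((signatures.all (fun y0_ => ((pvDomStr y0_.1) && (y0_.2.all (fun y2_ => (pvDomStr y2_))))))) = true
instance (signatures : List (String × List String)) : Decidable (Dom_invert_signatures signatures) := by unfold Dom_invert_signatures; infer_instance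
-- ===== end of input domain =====

-- B keeps each gene's label list sorted and duplicate-free by ordered insertion
-- as it goes, instead of A's set-per-gene plus a final sort of every value.

-- ===== PORT A =====
def normalize_gene_symbol (gene : String) : String :=
  PySem.Str.upper (PySem.Str.strip gene)

def invert_signatures (signatures : List (String × List String)) : List (String × List String) :=
  let gene_to_labels : PySem.Dict String (PySem.Set String) :=
    signatures.foldl (fun d p =>
      p.2.foldl (fun d gene =>
        let norm_gene := normalize_gene_symbol gene
        if norm_gene = "" then d
        -- setdefault(norm_gene, set()).add(label) = modify with default empty set
        else d.modify norm_gene PySem.Set.empty (fun s => s.add p.1)) d)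
      PySem.Dict.empty
  gene_to_labels.items.map (fun q => (q.1, PySem.List.sorted q.2 (fun x => x) false))

-- ===== PORT B =====
-- _insert_sorted_unique: insert lab into the sorted duplicate-free list labs
def insert_sorted_unique (labs : List String) (lab : String) : List String :=
  match labs with
  | [] => [lab]
  | x :: xs =>
    if lab = x then x :: xs
    else if lab < x then lab :: x :: xs
    else x :: insert_sorted_unique xs lab

def invert_signatures_alt (signatures : List (String × List String)) : List (String × List String) :=
  let gene_to_labels : PySem.Dict String (List String) :=
    signatures.foldl (fun d p =>
      p.2.foldl (fun d gene =>
        let g := normalize_gene_symbol gene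
        if g = "" then d
        -- gene_to_labels[g] = _insert_sorted_unique(gene_to_labels.get(g, []), label)
        else d.insert g (insert_sorted_unique (d.getD g []) p.1)) d)
      PySem.Dict.empty
  gene_to_labels.items

-- ===== PRECONDITION & SPEC =====
-- (no Pre_: both programs are total)
def Spec_invert_signatures (signatures : List (String × List String)) (out : List (String × List String)) : Prop := out = invert_signatures_alt signatures
instance (signatures : List (String × List String)) (out : List (String × List String)) : Decidable (Spec_invert_signatures signatures out) := by unfold Spec_invert_signatures; infer_instance

-- ===== CLAIM (what is proved, stated in full; the proofs are below) =====
def Claim_equal_invert_signatures : Prop := ∀ (signatures : List (String × List String)), Dom_invert_signatures signatures → Spec_invert_signatures signatures (invert_signatures signatures)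

-- ===== LEMMAS AND PROOFS =====

-- Normalized, non-empty gene symbols of one signature's gene list
def fgenes (gs : List String) : List String :=
  (gs.map normalize_gene_symbol).filter (fun s => decide (s ≠ ""))

-- The (normalized gene, label) occurrences, flattened in input order
def events (sigs : List (String × List String)) : List (String × String) :=
  sigs.flatMap (fun p => (fgenes p.2).map (fun g => (g, p.1)))

-- flattening the nested loop over one gene list
theorem foldl_inner_flatten {δ : Type} (f : δ → String → String → δ) (lab : String) :
    ∀ (gs : List String) (d : δ),
      gs.foldl (fun d gene => if normalize_gene_symbol gene = "" then d
          else f d (normalize_gene_symbol gene) lab) d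
      = ((fgenes gs).map (fun g => (g, lab))).foldl (fun d e => f d e.1 e.2) d := by
  intro gs
  induction gs with
  | nil => intro d; rfl
  | cons gene tl ih =>
    intro d
    by_cases h : normalize_gene_symbol gene = "" <;>
      simp [fgenes, h, List.foldl_cons, ih]

-- flattening the nested loops to a single loop over the events
theorem foldl_flatten {δ : Type} (f : δ → String → String → δ) :
    ∀ (sigs : List (String × List String)) (d0 : δ),
      sigs.foldl (fun d p => p.2.foldl (fun d gene => if normalize_gene_symbol gene = "" then d
          else f d (normalize_gene_symbol gene) p.1) d) d0
      = (events sigs).foldl (fun d e => f d e.1 e.2) d0 := by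
  intro sigs
  induction sigs with
  | nil => intro d0; rfl
  | cons p tl ih =>
    intro d0
    simp only [List.foldl_cons, events, List.flatMap_cons, List.foldl_append, ih]
    rw [foldl_inner_flatten]

theorem update_nil (l : List String) :
    PySem.Set.update ([] : PySem.Set String) l = PySem.Set.ofList l := by
  simp [PySem.Set.update, PySem.Set.ofList_eq_foldl]

-- ===== A-side per-key characterization =====

theorem getD_stepA : ∀ (ev : List (String × String)) (d : PySem.Dict String (PySem.Set String)) (g : String),
    (ev.foldl (fun d e => PySem.Dict.modify d e.1 PySem.Set.empty (fun s => PySem.Set.add s e.2)) d).getD g PySem.Set.empty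
    = ((ev.filter (fun e => e.1 == g)).map Prod.snd).foldl PySem.Set.add (d.getD g PySem.Set.empty) := by
  intro ev
  induction ev with
  | nil => intro d g; rfl
  | cons e tl ih =>
    intro d g
    rw [List.foldl_cons, ih, PySem.Dict.getD_modify, List.filter_cons]
    by_cases h : e.1 = g
    · simp [h]
    · have h1 : ¬ g = e.1 := fun hh => h hh.symm
      simp [h, h1]

-- ===== B-side per-key characterization =====

theorem getD_stepB : ∀ (ev : List (String × String)) (d : PySem.Dict String (List String)) (g : String),
    (ev.foldl (fun d e => PySem.Dict.insert d e.1 (insert_sorted_unique (d.getD e.1 []) e.2)) d).getD g []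
    = ((ev.filter (fun e => e.1 == g)).map Prod.snd).foldl insert_sorted_unique (d.getD g []) := by
  intro ev
  induction ev with
  | nil => intro d g; rfl
  | cons e tl ih =>
    intro d g
    rw [List.foldl_cons, ih, List.filter_cons, PySem.Dict.getD_insert]
    by_cases h : e.1 = g
    · simp [h]
    · have h1 : ¬ g = e.1 := fun hh => h hh.symm
      rw [if_neg h1]
      simp [h]

-- ===== insert_sorted_unique facts =====

theorem mem_insert_sorted_unique (l : List String) (lab a : String) :
    a ∈ insert_sorted_unique l lab ↔ a = lab ∨ a ∈ l := by
  induction l with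
  | nil => simp [insert_sorted_unique]
  | cons x xs ih =>
    by_cases h1 : lab = x
    · have hstep : insert_sorted_unique (x :: xs) lab = x :: xs := by
        simp [insert_sorted_unique, h1]
      rw [hstep, h1]
      constructor
      · exact fun hm => Or.inr hm
      · rintro (rfl | hm)
        · exact List.mem_cons_self
        · exact hm
    · by_cases h2 : lab < x
      · have hstep : insert_sorted_unique (x :: xs) lab = lab :: x :: xs := by
          simp [insert_sorted_unique, h1, h2]
        rw [hstep]
        simp [List.mem_cons]
      · have hstep : insert_sorted_unique (x :: xs) lab = x :: insert_sorted_unique xs lab := by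
          simp [insert_sorted_unique, h1, h2]
        rw [hstep]
        simp only [List.mem_cons, ih]
        tauto

theorem pairwise_insert_sorted_unique (l : List String) (lab : String)
    (h : l.Pairwise (· < ·)) : (insert_sorted_unique l lab).Pairwise (· < ·) := by
  induction l with
  | nil => simp [insert_sorted_unique]
  | cons x xs ih =>
    rcases List.pairwise_cons.mp h with ⟨hx, hxs⟩
    by_cases h1 : lab = x
    · simpa [insert_sorted_unique, h1] using h
    · by_cases h2 : lab < x
      · simp only [insert_sorted_unique, if_neg h1, if_pos h2]
        exact List.pairwise_cons.mpr ⟨by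
          intro a ha
          rcases List.mem_cons.mp ha with rfl | ha
          · exact h2
          · exact lt_trans h2 (hx a ha), h⟩
      · have hxl : x < lab := lt_of_le_of_ne (not_lt.mp h2) (Ne.symm h1)
        simp only [insert_sorted_unique, if_neg h1, if_neg h2]
        exact List.pairwise_cons.mpr ⟨by
          intro a ha
          rcases (mem_insert_sorted_unique xs lab a).mp ha with rfl | ha
          · exact hxl
          · exact hx a ha, ih hxs⟩

theorem mem_foldl_isu : ∀ (ls : List String) (acc : List String) (a : String),
    a ∈ ls.foldl insert_sorted_unique acc ↔ a ∈ acc ∨ a ∈ ls := by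
  intro ls
  induction ls with
  | nil => intro acc a; simp
  | cons lab tl ih =>
    intro acc a
    rw [List.foldl_cons, ih, mem_insert_sorted_unique]
    simp [List.mem_cons]
    tauto

theorem pairwise_foldl_isu : ∀ (ls : List String) (acc : List String),
    acc.Pairwise (· < ·) → (ls.foldl insert_sorted_unique acc).Pairwise (· < ·) := by
  intro ls
  induction ls with
  | nil => intro acc h; exact h
  | cons lab tl ih =>
    intro acc h
    exact ih _ (pairwise_insert_sorted_unique acc lab h)

-- sorted(set(ls)) = fold of ordered unique insertion over ls
theorem value_eq (ls : List String) :
    PySem.List.sorted (PySem.Set.ofList ls) (fun x => x) false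
    = ls.foldl insert_sorted_unique [] := by
  have hpw : (ls.foldl insert_sorted_unique []).Pairwise (· < ·) :=
    pairwise_foldl_isu ls [] (by simp)
  have hnd : (ls.foldl insert_sorted_unique []).Nodup :=
    hpw.imp ne_of_lt
  have hperm : (ls.foldl insert_sorted_unique []).Perm (PySem.Set.ofList ls) :=
    (List.perm_ext_iff_of_nodup hnd (PySem.Set.nodup_ofList _)).mpr (by
      intro a
      rw [mem_foldl_isu, PySem.Set.mem_ofList]
      simp)
  exact PySem.List.sorted_eq_of_perm_of_pairwise_lt _ _ _ hperm hpw

-- ===== VERDICT (by name: the statement is the Claim_ definition above) =====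
theorem invert_signatures_spec : Claim_equal_invert_signatures := by
  intro sigs _hdom
  unfold Spec_invert_signatures
  -- flatten both nested loops to one loop over the events
  have hA0 : invert_signatures sigs
      = ((events sigs).foldl (fun d e => PySem.Dict.modify d e.1 PySem.Set.empty (fun s => PySem.Set.add s e.2)) PySem.Dict.empty).items.map
          (fun q => (q.1, PySem.List.sorted q.2 (fun x => x) false)) :=
    congrArg (fun (d : PySem.Dict String (PySem.Set String)) =>
        d.items.map (fun (q : String × PySem.Set String) => (q.1, PySem.List.sorted q.2 (fun x => x) false)))
      (foldl_flatten (fun d g lab => PySem.Dict.modify d g PySem.Set.empty (fun s => PySem.Set.add s lab)) sigs PySem.Dict.empty)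
  have hB0 : invert_signatures_alt sigs
      = ((events sigs).foldl (fun d e => PySem.Dict.insert d e.1 (insert_sorted_unique (d.getD e.1 []) e.2)) PySem.Dict.empty).items :=
    congrArg (fun (d : PySem.Dict String (List String)) => d.items)
      (foldl_flatten (fun d g lab => PySem.Dict.insert d g (insert_sorted_unique (d.getD g []) lab)) sigs PySem.Dict.empty)
  -- keys of both dicts
  have hkeysA : ((events sigs).foldl (fun d e => PySem.Dict.modify d e.1 PySem.Set.empty (fun s => PySem.Set.add s e.2)) PySem.Dict.empty).keys
      = PySem.Set.ofList ((events sigs).map Prod.fst) := by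
    have h := PySem.Dict.keys_foldl_modify_key (events sigs) Prod.fst PySem.Set.empty
      (fun _ e s => PySem.Set.add s e.2) PySem.Dict.empty
    rw [PySem.Dict.keys_empty, update_nil] at h
    exact h
  have hkeysB : ((events sigs).foldl (fun d e => PySem.Dict.insert d e.1 (insert_sorted_unique (d.getD e.1 []) e.2)) PySem.Dict.empty).keys
      = PySem.Set.ofList ((events sigs).map Prod.fst) := by
    have h := PySem.Dict.keys_foldl_insert_key (events sigs) Prod.fst
      (fun d e => insert_sorted_unique (d.getD e.1 []) e.2) PySem.Dict.empty
    rw [PySem.Dict.keys_empty, update_nil] at h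
    exact h
  have hndA : ((events sigs).foldl (fun d e => PySem.Dict.modify d e.1 PySem.Set.empty (fun s => PySem.Set.add s e.2)) PySem.Dict.empty).keys.Nodup := by
    rw [hkeysA]; exact PySem.Set.nodup_ofList _
  have hndB : ((events sigs).foldl (fun d e => PySem.Dict.insert d e.1 (insert_sorted_unique (d.getD e.1 []) e.2)) PySem.Dict.empty).keys.Nodup := by
    rw [hkeysB]; exact PySem.Set.nodup_ofList _
  -- per-key values
  have hgetA : ∀ g, ((events sigs).foldl (fun d e => PySem.Dict.modify d e.1 PySem.Set.empty (fun s => PySem.Set.add s e.2)) PySem.Dict.empty).getD g PySem.Set.empty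
      = PySem.Set.ofList (((events sigs).filter (fun e => e.1 == g)).map Prod.snd) := by
    intro g
    rw [getD_stepA, PySem.Dict.getD_empty]
    exact (PySem.Set.ofList_eq_foldl _).symm
  have hgetB : ∀ g, ((events sigs).foldl (fun d e => PySem.Dict.insert d e.1 (insert_sorted_unique (d.getD e.1 []) e.2)) PySem.Dict.empty).getD g []
      = (((events sigs).filter (fun e => e.1 == g)).map Prod.snd).foldl insert_sorted_unique [] := by
    intro g
    rw [getD_stepB, PySem.Dict.getD_empty]
  rw [hA0, hB0,
    PySem.Dict.items_eq_map_keys _ hndA PySem.Set.empty,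
    PySem.Dict.items_eq_map_keys _ hndB ([] : List String),
    hkeysA, hkeysB, List.map_map]
  refine List.map_congr_left (fun k _ => ?_)
  simp only [Function.comp]
  rw [hgetA k, hgetB k, value_eq]
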